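-- pv_equiv track=rewrite | github.com/MarekLipan/AoC | years/2015/day_5/task_1.py | solution
-- ===== SOURCE A (Python) =====
-- from typing import List
--
-- def solution(inp: List[str]):
--     """Placeholder for the solution function"""
--
--     result = 0
--
--     for s in inp:
--         vowel_condition = False
--         twice_in_row_letter_condition = False
--         forbidden_string_condition = False
--         vowels = 0
--
--         for l in s:
--             if l in ["a", "e", "i", "o", "u"]:
--                 vowels += 1
--
--         if vowels >= 3:
--             vowel_condition = True
--
--         for i in range(len(s) - 1):
--             if s[i] == s[i + 1]:
--                 twice_in_row_letter_condition = True
--             if s[i : i + 2] in ["ab", "cd", "pq", "xy"]: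
--                 forbidden_string_condition = True
--
--         if (
--             vowel_condition
--             and twice_in_row_letter_condition
--             and not forbidden_string_condition
--         ):
--             result += 1
--
--     return result
-- ===== SOURCE B (Python) =====
-- from typing import List
--
-- _FORBIDDEN = (("a", "b"), ("c", "d"), ("p", "q"), ("x", "y"))
-- _VOWELS = "aeiou"
--
--
-- def _nice(s: str) -> bool:
--     """Single streaming pass: reject as soon as a forbidden pair appears,
--     count down the vowels still needed, remember a doubled letter."""
--     if not s:
--         return False
--     prev = s[0]
--     need = 3 - (prev in _VOWELS)
--     double = False
--     for c in s[1:]: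
--         if (prev, c) in _FORBIDDEN:
--             return False
--         double = double or c == prev
--         if need and c in _VOWELS:
--             need -= 1
--         prev = c
--     return need == 0 and double
--
--
-- def solution(inp: List[str]):
--     return sum(map(_nice, inp))
-- ===== Notes on version B (the rewrite author's own statement) =====
-- stated objective: alternative
-- what changed: A stages three passes per string (a vowel-count loop, then an index loop over range(len-1) testing s[i]==s[i+1] and slice membership, then combines three flags); B is a single streaming state-machine pass carrying (prev char, vowels-still-needed countdown, double flag) that rejects early on the first forbidden pair, plus sum(map(...)) over the list.
import Mathlib
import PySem

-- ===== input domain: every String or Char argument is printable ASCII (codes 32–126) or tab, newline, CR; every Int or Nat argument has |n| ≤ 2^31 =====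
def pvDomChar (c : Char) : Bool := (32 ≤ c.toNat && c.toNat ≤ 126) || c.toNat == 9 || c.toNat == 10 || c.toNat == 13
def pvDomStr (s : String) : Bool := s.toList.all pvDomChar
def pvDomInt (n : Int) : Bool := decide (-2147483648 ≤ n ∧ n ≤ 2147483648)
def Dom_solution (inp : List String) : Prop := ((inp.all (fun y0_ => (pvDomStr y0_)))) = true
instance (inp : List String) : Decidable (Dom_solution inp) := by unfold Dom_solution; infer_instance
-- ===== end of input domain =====

-- B replaces A's staged loops (vowel pass, then an index/slice pass setting flags) by a
-- single streaming state-machine pass per string with early rejection; objective: alternative.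

-- ===== PORT A =====
def solution (inp : List String) : Int :=
  inp.foldl (fun result s =>
    let t := s.toList
    -- vowels loop: for l in s: if l in ["a","e","i","o","u"]: vowels += 1
    let vowels : Int :=
      t.foldl (fun v l => if ['a', 'e', 'i', 'o', 'u'].contains l then v + 1 else v) 0
    let vowel_condition : Bool := if 3 ≤ vowels then true else false
    -- for i in range(len(s) - 1): set the two flags
    let flags : Bool × Bool :=
      (PySem.List.pyRange 0 ((t.length : Int) - 1) 1).foldl
        (fun (st : Bool × Bool) i =>
          (if PySem.List.pyGet? t i == PySem.List.pyGet? t (i + 1) then true else st.1,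
           if [['a','b'], ['c','d'], ['p','q'], ['x','y']].contains
                (PySem.List.slice t (some i) (some (i + 2))) then true else st.2))
        (false, false)
    if vowel_condition && flags.1 && !flags.2 then result + 1 else result) 0

-- ===== PORT B =====
-- one step of Source B's streaming loop; `none` = the early `return False` was taken
def stepAlt (st : Option (Char × Int × Bool)) (c : Char) : Option (Char × Int × Bool) :=
  match st with
  | none => none
  | some (prev, need, dbl) =>
    if [('a','b'), ('c','d'), ('p','q'), ('x','y')].contains (prev, c) then none
    else some (c, (if need != 0 && ['a','e','i','o','u'].contains c then need - 1 else need),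
               (dbl || c == prev))

-- the final `return need == 0 and double` (false if the loop bailed out)
def finishAlt : Option (Char × Int × Bool) → Bool
  | none => false
  | some (_, need, dbl) => need == 0 && dbl

def niceAlt (s : String) : Bool :=
  match s.toList with
  | [] => false
  | first :: rest =>
      finishAlt (rest.foldl stepAlt
        (some (first, 3 - (if ['a','e','i','o','u'].contains first then 1 else 0), false)))

def solution_alt (inp : List String) : Int :=
  inp.foldl (fun acc s => acc + (if niceAlt s then 1 else 0)) 0

-- ===== PRECONDITION & SPEC =====
def Spec_solution (inp : List String) (out : Int) : Prop := out = solution_alt inp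
instance (inp : List String) (out : Int) : Decidable (Spec_solution inp out) := by unfold Spec_solution; infer_instance

-- ===== CLAIM (what is proved, stated in full; the proofs are below) =====
def Claim_equal_solution : Prop := ∀ (inp : List String), Dom_solution inp → Spec_solution inp (solution inp)

-- ===== LEMMAS AND PROOFS =====

-- abbreviations for the three per-string conditions, over adjacent pairs
def hasDouble (t : List Char) : Bool := (t.zip t.tail).any (fun p => p.1 == p.2)
def hasForb (t : List Char) : Bool :=
  (t.zip t.tail).any (fun p => [('a','b'), ('c','d'), ('p','q'), ('x','y')].contains p)
def countV (t : List Char) : Nat := t.countP (fun c => ['a','e','i','o','u'].contains c)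

-- membership in the adjacent-pair zip, by index
theorem mem_zip_tail_iff (t : List Char) (a b : Char) :
    (a, b) ∈ t.zip t.tail ↔ ∃ j : Nat, ∃ h : j + 1 < t.length, t[j] = a ∧ t[j+1] = b := by
  constructor
  · intro hm
    rw [List.mem_iff_getElem] at hm
    obtain ⟨i, hi, he⟩ := hm
    have hlen : (t.zip t.tail).length = min t.length (t.length - 1) := by simp [List.length_zip]
    refine ⟨i, by simp [hlen] at hi; omega, ?_⟩
    rw [List.getElem_zip] at he
    have h1 : t.tail[i]'(by simp [hlen] at hi ⊢; omega) = t[i+1]'(by simp [hlen] at hi; omega) := by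
      simp [List.getElem_tail]
    rw [Prod.mk.injEq] at he
    exact ⟨he.1, h1 ▸ he.2⟩
  · rintro ⟨j, h, ha, hb⟩
    rw [List.mem_iff_getElem]
    refine ⟨j, by simp [List.length_zip]; omega, ?_⟩
    rw [List.getElem_zip]
    simp [List.getElem_tail, ha, hb]

-- the index loop over range(len-1), as a loop over Nat indices
theorem pyRange_pred_any (f : Int → Bool) (n : Nat) :
    (PySem.List.pyRange 0 ((n : Int) - 1) 1).any f
      = (List.range (n - 1)).any (fun j => f (j : Int)) := by
  cases n with
  | zero =>
    have h : PySem.List.pyRange 0 ((0 : Nat) - 1 : Int) 1 = [] := by decide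
    rw [h]; simp
  | succ m =>
    have h : ((m + 1 : Nat) : Int) - 1 = (m : Int) := by push_cast; ring
    rw [h, PySem.List.pyRange_zero_natCast, List.any_map]
    simp [Function.comp_def]

theorem take_two (t : List Char) (j : Nat) (h : j + 1 < t.length) :
    (t.drop j).take 2 = [t[j], t[j+1]] := by
  rw [List.drop_eq_getElem_cons (by omega)]
  rw [List.take_succ_cons]
  rw [List.drop_eq_getElem_cons (i := j + 1) (by omega)]
  rw [List.take_succ_cons]
  simp

-- A's double-letter flag equals the adjacent-pair test
theorem tw_eq (t : List Char) :
    ((PySem.List.pyRange 0 ((t.length : Int) - 1) 1).any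
       (fun i => PySem.List.pyGet? t i == PySem.List.pyGet? t (i + 1)))
    = hasDouble t := by
  rw [pyRange_pred_any]
  rw [Bool.eq_iff_iff, List.any_eq_true, hasDouble, List.any_eq_true]
  constructor
  · rintro ⟨j, hj, hpred⟩
    rw [List.mem_range] at hj
    have hj1 : j + 1 < t.length := by omega
    have e1 : PySem.List.pyGet? t (j : Int) = some (t[j]'(by omega)) := by
      rw [PySem.List.pyGet?_natCast]; exact List.getElem?_eq_getElem _
    have e2 : PySem.List.pyGet? t ((j : Int) + 1) = some (t[j+1]'hj1) := by
      have hc : ((j : Int) + 1) = ((j + 1 : Nat) : Int) := by push_cast; ring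
      rw [hc, PySem.List.pyGet?_natCast]; exact List.getElem?_eq_getElem _
    simp only [e1, e2] at hpred
    refine ⟨(t[j]'(by omega), t[j+1]'hj1), (mem_zip_tail_iff t _ _).2 ⟨j, hj1, rfl, rfl⟩, by simpa using hpred⟩
  · rintro ⟨⟨a, b⟩, hm, hpred⟩
    obtain ⟨j, hj1, ha, hb⟩ := (mem_zip_tail_iff t a b).1 hm
    refine ⟨j, List.mem_range.2 (by omega), ?_⟩
    have e1 : PySem.List.pyGet? t (j : Int) = some (t[j]'(by omega)) := by
      rw [PySem.List.pyGet?_natCast]; exact List.getElem?_eq_getElem _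
    have e2 : PySem.List.pyGet? t ((j : Int) + 1) = some (t[j+1]'hj1) := by
      have hc : ((j : Int) + 1) = ((j + 1 : Nat) : Int) := by push_cast; ring
      rw [hc, PySem.List.pyGet?_natCast]; exact List.getElem?_eq_getElem _
    simp only [e1, e2]
    simp only [ha, hb] at *
    simpa using hpred

-- A's forbidden flag equals the adjacent-pair test
theorem fb_eq (t : List Char) :
    ((PySem.List.pyRange 0 ((t.length : Int) - 1) 1).any
       (fun i => [['a','b'], ['c','d'], ['p','q'], ['x','y']].contains
          (PySem.List.slice t (some i) (some (i + 2)))))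
    = hasForb t := by
  rw [pyRange_pred_any]
  rw [Bool.eq_iff_iff, List.any_eq_true, hasForb, List.any_eq_true]
  have hslice : ∀ (j : Nat) (hj1 : j + 1 < t.length),
      PySem.List.slice t (some (j : Int)) (some ((j : Int) + 2)) = [t[j]'(by omega), t[j+1]'(by omega)] := by
    intro j hj1
    have hc : ((j : Int) + 2) = ((j + 2 : Nat) : Int) := by push_cast; ring
    rw [hc, PySem.List.slice_natCast]
    rw [show j + 2 - j = 2 from by omega]
    exact take_two t j hj1
  have hmatch : ∀ (a b : Char),
      ([['a','b'], ['c','d'], ['p','q'], ['x','y']].contains [a, b])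
        = ([('a','b'), ('c','d'), ('p','q'), ('x','y')].contains (a, b)) := by
    intro a b
    simp [List.contains_eq_mem, Prod.ext_iff, List.cons_eq_cons]
  constructor
  · rintro ⟨j, hj, hpred⟩
    rw [List.mem_range] at hj
    have hj1 : j + 1 < t.length := by omega
    rw [hslice j hj1, hmatch] at hpred
    exact ⟨(t[j]'(by omega), t[j+1]'hj1), (mem_zip_tail_iff t _ _).2 ⟨j, hj1, rfl, rfl⟩, hpred⟩
  · rintro ⟨⟨a, b⟩, hm, hpred⟩
    obtain ⟨j, hj1, ha, hb⟩ := (mem_zip_tail_iff t a b).1 hm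
    refine ⟨j, List.mem_range.2 (by omega), ?_⟩
    rw [hslice j hj1, hmatch, ha, hb]
    exact hpred

-- a rejected state stays rejected
theorem foldl_step_none (l : List Char) : l.foldl stepAlt none = none := by
  induction l with
  | nil => rfl
  | cons c rest ih =>
    rw [List.foldl_cons]
    exact ih

-- the streaming loop computes the three conditions at once
theorem scan_eq (l : List Char) : ∀ (prev : Char) (need : Int) (dbl : Bool), 0 ≤ need →
    finishAlt (l.foldl stepAlt (some (prev, need, dbl)))
      = ((!hasForb (prev :: l)) && decide (need ≤ (countV l : Int))
          && (dbl || hasDouble (prev :: l))) := by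
  induction l with
  | nil =>
    intro prev need dbl h
    simp only [List.foldl_nil, finishAlt, hasForb, hasDouble, countV]
    simp only [List.tail_cons, List.zip_nil_right, List.any_nil, List.countP_nil]
    have : (need == 0) = decide (need ≤ (0 : Int)) := by
      rw [Bool.eq_iff_iff]; simp; omega
    rw [this]; simp
  | cons c rest ih =>
    intro prev need dbl h
    have hzip : ∀ d t, hasForb (d :: c :: t) =
        ([('a','b'), ('c','d'), ('p','q'), ('x','y')].contains (d, c) || hasForb (c :: t)) := by
      intro d t; simp [hasForb]
    have hzipD : hasDouble (prev :: c :: rest) = ((prev == c) || hasDouble (c :: rest)) := by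
      simp [hasDouble]
    rw [List.foldl_cons]
    by_cases hf : ([('a','b'), ('c','d'), ('p','q'), ('x','y')].contains (prev, c)) = true
    · have hstep : stepAlt (some (prev, need, dbl)) c = none := by
        simp only [stepAlt]
        rw [if_pos hf]
      rw [hstep, foldl_step_none, hzip, hf]
      simp [finishAlt]
    · have hstep : stepAlt (some (prev, need, dbl)) c
          = some (c, (if need != 0 && ['a','e','i','o','u'].contains c then need - 1 else need),
                  (dbl || c == prev)) := by
        simp only [stepAlt]
        rw [if_neg hf]
      rw [hstep, hzip, Bool.eq_false_iff.mpr hf, Bool.false_or]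
      have hneed' : (0:Int) ≤ (if need != 0 && ['a','e','i','o','u'].contains c then need - 1 else need) := by
        split_ifs with hx
        · simp only [Bool.and_eq_true, bne_iff_ne, ne_eq] at hx
          omega
        · exact h
      rw [ih c _ (dbl || c == prev) hneed']
      have hcv : (countV (c :: rest) : Int) = (countV rest : Int) + (if ['a','e','i','o','u'].contains c then 1 else 0) := by
        simp only [countV, List.countP_cons]
        split_ifs with hx <;> simp [hx] <;> push_cast <;> ring
      have hle : (decide ((if need != 0 && ['a','e','i','o','u'].contains c then need - 1 else need) ≤ (countV rest : Int)))
          = decide (need ≤ (countV (c :: rest) : Int)) := by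
        rcases Bool.eq_false_or_eq_true (['a','e','i','o','u'].contains c) with hv | hv <;>
          rw [Bool.eq_iff_iff] <;>
          simp only [decide_eq_true_eq, hcv, hv, Bool.and_eq_true, bne_iff_ne, ne_eq,
            if_true, if_false, Bool.and_false, Bool.and_true] <;>
          first
          | (split_ifs <;> omega)
          | omega
      rw [hle, hzipD]
      have hdb : ((dbl || c == prev) || hasDouble (c :: rest)) = (dbl || ((prev == c) || hasDouble (c :: rest))) := by
        rw [Bool.eq_iff_iff]
        simp only [Bool.or_eq_true, beq_iff_eq]
        constructor
        · rintro ((h1 | h1) | h1)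
          · exact Or.inl h1
          · exact Or.inr (Or.inl h1.symm)
          · exact Or.inr (Or.inr h1)
        · rintro (h1 | h1 | h1)
          · exact Or.inl (Or.inl h1)
          · exact Or.inl (Or.inr h1.symm)
          · exact Or.inr h1
      rw [hdb]

-- B's match-wrapper over a list, characterised
theorem nice_list (t : List Char) :
    (match t with
     | [] => false
     | first :: rest =>
         finishAlt (rest.foldl stepAlt
           (some (first, 3 - (if ['a','e','i','o','u'].contains first then 1 else 0), false))))
      = ((!hasForb t) && decide ((3:Int) ≤ (countV t : Int)) && hasDouble t) := by
  cases t with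
  | nil => simp [hasForb, hasDouble, countV]
  | cons first rest =>
    have hred : (match first :: rest with
        | [] => false
        | f :: r => finishAlt (r.foldl stepAlt
            (some (f, 3 - (if ['a','e','i','o','u'].contains f then 1 else 0), false))))
        = finishAlt (rest.foldl stepAlt
            (some (first, 3 - (if ['a','e','i','o','u'].contains first then 1 else 0), false))) := rfl
    rw [hred, scan_eq rest first _ false (by split_ifs <;> omega)]
    have h3 : (decide ((3 - (if ['a','e','i','o','u'].contains first then (1:Int) else 0)) ≤ (countV rest : Int)))
        = decide ((3:Int) ≤ (countV (first :: rest) : Int)) := by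
      rw [Bool.eq_iff_iff]
      simp only [decide_eq_true_eq, countV, List.countP_cons]
      split_ifs <;> push_cast <;> omega
    rw [h3, Bool.false_or]

-- A's per-string acceptance condition is exactly B's niceAlt
theorem nice_eq (s : String) :
    (let t := s.toList
     let vowels : Int :=
       t.foldl (fun v l => if ['a', 'e', 'i', 'o', 'u'].contains l then v + 1 else v) 0
     let vowel_condition : Bool := if 3 ≤ vowels then true else false
     let flags : Bool × Bool :=
       (PySem.List.pyRange 0 ((t.length : Int) - 1) 1).foldl
         (fun (st : Bool × Bool) i =>
           (if PySem.List.pyGet? t i == PySem.List.pyGet? t (i + 1) then true else st.1,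
            if [['a','b'], ['c','d'], ['p','q'], ['x','y']].contains
                 (PySem.List.slice t (some i) (some (i + 2))) then true else st.2))
         (false, false)
     vowel_condition && flags.1 && !flags.2) = niceAlt s := by
  simp only [niceAlt]
  set t := s.toList with ht
  rw [PySem.List.foldl_prod_mk
      (f := fun b i => if PySem.List.pyGet? t i == PySem.List.pyGet? t (i + 1) then true else b)
      (g := fun b i => if [['a','b'], ['c','d'], ['p','q'], ['x','y']].contains
              (PySem.List.slice t (some i) (some (i + 2))) then true else b)]
  rw [PySem.List.foldl_if_true_eq, PySem.List.foldl_if_true_eq]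
  simp only [Bool.false_or]
  rw [PySem.List.foldl_if_add_one]
  rw [tw_eq t, fb_eq t]
  rw [nice_list t]
  have hvc : (if 3 ≤ (0 : Int) + (t.countP (fun c => ['a','e','i','o','u'].contains c) : Int) then true else false)
      = decide ((3:Int) ≤ (countV t : Int)) := by
    rw [Bool.eq_iff_iff, countV]
    split_ifs with hx
    · exact iff_of_true rfl (by simp only [decide_eq_true_eq]; omega)
    · exact iff_of_false (by simp) (by simp only [decide_eq_true_eq]; omega)
  rw [hvc]
  cases (decide ((3:Int) ≤ (countV t : Int))) <;> cases hasForb t <;> cases hasDouble t <;> rfl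

-- ===== VERDICT (by name: the statement is the Claim_ definition above) =====
theorem solution_spec : Claim_equal_solution := by
  intro inp _
  unfold Spec_solution
  unfold solution solution_alt
  refine Eq.trans (PySem.List.foldl_congr_mem inp _
      (fun acc s => if niceAlt s then acc + 1 else acc) 0
      (fun acc s _ => by
        show _ = if niceAlt s = true then acc + 1 else acc
        rw [← nice_eq s])) ?_
  refine PySem.List.foldl_congr_mem inp _ _ 0 (fun acc s _ => ?_)
  cases h : niceAlt s <;> simp [h]
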